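-- pv_equiv track=rewrite | github.com/swang2000/DSAPractice | MS_URLshorten.py | decTO62
-- ===== SOURCE A (Python) =====
-- def decTO62(a):
--     dic = "abcdefghijklmnopqrstuvwxyzABCDEFGHIJKLMNOPQRSTUVWXYZ0123456789"
--     s = []
--     m = a
--     while m >0:
--         s.append(m%62)
--         m = m //62
--     n = len(s)
--     out = ''
--     for i in range(n-1, -1, -1):
--         out += dic[s[i]]
--     return out
-- ===== SOURCE B (Python) =====
-- def decTO62(a):
--     dic = "abcdefghijklmnopqrstuvwxyzABCDEFGHIJKLMNOPQRSTUVWXYZ0123456789"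
--     if a <= 0:
--         return ''
--     return decTO62(a // 62) + dic[a % 62]
-- ===== Notes on version B (the rewrite author's own statement) =====
-- stated objective: idiomatic
-- what changed: Replaces the explicit digit-list build plus index-reversed concatenation loop with a direct recursion f(a) = f(a//62) + dic[a%62] that emits digits most-significant-first without any intermediate list.
import Mathlib
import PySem

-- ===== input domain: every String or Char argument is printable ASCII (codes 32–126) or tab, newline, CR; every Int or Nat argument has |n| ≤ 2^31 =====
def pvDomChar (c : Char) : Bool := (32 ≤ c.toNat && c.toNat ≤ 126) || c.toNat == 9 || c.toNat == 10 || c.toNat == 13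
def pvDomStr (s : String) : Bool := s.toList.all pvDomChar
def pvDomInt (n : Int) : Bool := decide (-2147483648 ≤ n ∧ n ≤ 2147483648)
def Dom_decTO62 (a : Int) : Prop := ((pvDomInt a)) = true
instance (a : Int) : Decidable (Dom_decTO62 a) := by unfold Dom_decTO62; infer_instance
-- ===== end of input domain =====

-- B: the iterative digit-list build + reversed-index concatenation is replaced by the
-- direct recursion f(a) = f(a//62) + dic[a%62], emitting digits most-significant-first.

-- the digit alphabet, shared verbatim by both Pythons
def dic62 : List Char :=
  "abcdefghijklmnopqrstuvwxyzABCDEFGHIJKLMNOPQRSTUVWXYZ0123456789".toList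

-- ===== PORT A =====
-- A's while loop: s.append(m%62); m = m//62   (cons produces the same append order)
def decA_loop (m : Int) : List Int :=
  if _h : 0 < m then PySem.Int.mod m 62 :: decA_loop (PySem.Int.floordiv m 62) else []
termination_by m.toNat
decreasing_by
  have h1 : PySem.Int.floordiv m 62 = m / 62 := PySem.Int.floordiv_eq_ediv_of_pos (by omega)
  rw [h1]; omega

def decTO62 (a : Int) : String :=
  -- s := the digit list; n := len(s); out built by the index loop, then returned
  String.ofList
    ((PySem.List.pyRange (((decA_loop a).length : Int) - 1) (-1) (-1)).foldl
      (fun out i =>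
        out ++ [(PySem.List.pyGet? dic62 ((PySem.List.pyGet? (decA_loop a) i).getD 0)).getD 'a'])
      [])

-- ===== PORT B =====
def decAlt_chars (a : Int) : List Char :=
  if _h : a ≤ 0 then []
  else decAlt_chars (PySem.Int.floordiv a 62) ++
       [(PySem.List.pyGet? dic62 (PySem.Int.mod a 62)).getD 'a']
termination_by a.toNat
decreasing_by
  have h1 : PySem.Int.floordiv a 62 = a / 62 := PySem.Int.floordiv_eq_ediv_of_pos (by omega)
  rw [h1]; omega

def decTO62_alt (a : Int) : String := String.ofList (decAlt_chars a)

-- ===== PRECONDITION & SPEC =====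
def Spec_decTO62 (a : Int) (out : String) : Prop := out = decTO62_alt a
instance (a : Int) (out : String) : Decidable (Spec_decTO62 a out) := by unfold Spec_decTO62; infer_instance

-- ===== CLAIM (what is proved, stated in full; the proofs are below) =====
def Claim_equal_decTO62 : Prop := ∀ (a : Int), Dom_decTO62 a → Spec_decTO62 a (decTO62 a)

-- ===== LEMMAS AND PROOFS =====

-- A's for-loop over range(n-1, -1, -1): reading s[j-1] … s[0] appends the mapped
-- reverse of (s.take j) to the accumulator.
theorem decA_fold (s : List Int) (g : Int → Char) :
    ∀ (j : Nat), j ≤ s.length → ∀ (acc : List Char),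
    (PySem.List.pyRange ((j : Int) - 1) (-1) (-1)).foldl
      (fun out i => out ++ [g ((PySem.List.pyGet? s i).getD 0)]) acc
    = acc ++ ((s.take j).reverse.map g) := by
  intro j
  induction j with
  | zero =>
    intro _ acc
    rw [PySem.List.pyRange_neg_one_eq_nil (by omega)]
    simp
  | succ j ih =>
    intro hj acc
    have hlt : j < s.length := by omega
    rw [show ((j + 1 : Nat) : Int) - 1 = (j : Int) by push_cast; ring,
        PySem.List.pyRange_neg_one_cons (by omega), List.foldl_cons]
    have hget : PySem.List.pyGet? s (j : Int) = some s[j] := by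
      simp [PySem.List.pyGet?, PySem.List.pyIdx?, hlt]
    rw [show ((j : Int) - 1) = ((j : Nat) : Int) - 1 from rfl]
    rw [ih (by omega)]
    rw [hget]
    rw [List.take_add_one, List.reverse_append]
    simp [List.getElem?_eq_getElem hlt]

theorem decA_eq_alt_chars : ∀ (n : Nat) (a : Int), a.toNat ≤ n →
    (decA_loop a).reverse.map
      (fun d => (PySem.List.pyGet? dic62 d).getD 'a') = decAlt_chars a := by
  intro n
  induction n with
  | zero =>
    intro a ha
    have hle : a ≤ 0 := by omega
    rw [decA_loop, decAlt_chars]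
    simp [hle, not_lt.mpr hle]
  | succ n ih =>
    intro a ha
    by_cases hpos : 0 < a
    · have h1 : PySem.Int.floordiv a 62 = a / 62 :=
        PySem.Int.floordiv_eq_ediv_of_pos (by omega)
      have hne : ¬ a ≤ 0 := by omega
      rw [decA_loop, decAlt_chars]
      simp only [hpos, hne, dif_pos, dif_neg, not_false_iff]
      rw [List.reverse_cons, List.map_append]
      rw [ih (PySem.Int.floordiv a 62) (by rw [h1]; omega)]
      simp
    · have hle : a ≤ 0 := by omega
      rw [decA_loop, decAlt_chars]
      simp [hpos, hle]

-- ===== VERDICT (by name: the statement is the Claim_ definition above) =====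
theorem decTO62_spec : Claim_equal_decTO62 := by
  intro a _
  unfold Spec_decTO62 decTO62 decTO62_alt
  have hf := decA_fold (decA_loop a)
      (fun d => (PySem.List.pyGet? dic62 d).getD 'a') (decA_loop a).length le_rfl []
  simp only at hf
  rw [hf, List.take_length, List.nil_append]
  rw [decA_eq_alt_chars a.toNat a le_rfl]
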